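-- pv_equiv track=rewrite | github.com/Great-MissG/fimile_bill | app.py | base_rate_from_billable
-- ===== SOURCE A (Python) =====
-- def base_rate_from_billable(bw):
--     """按 IFS 梯度（>200 也取 60）"""
--     if bw is None:
--         return None
--     thresholds = [
--         (30, 5), (40, 8), (50, 8), (60, 10), (70, 13),
--         (80, 15), (90, 18), (100, 21), (110, 24), (120, 25),
--         (130, 27), (140, 27), (150, 30), (200, 60)
--     ]
--     for t, v in thresholds:
--         if bw <= t:
--             return v
--     return 60  # >200 仍旧 60
-- ===== SOURCE B (Python) =====
-- import bisect
--
-- _KEYS = [30, 40, 50, 60, 70, 80, 90, 100, 110, 120, 130, 140, 150, 200]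
-- _VALS = [5, 8, 8, 10, 13, 15, 18, 21, 24, 25, 27, 27, 30, 60]
--
-- def base_rate_from_billable(bw):
--     if bw is None:
--         return None
--     i = bisect.bisect_left(_KEYS, bw)
--     return _VALS[i] if i < len(_KEYS) else 60
-- ===== Notes on version B (the rewrite author's own statement) =====
-- stated objective: idiomatic
-- what changed: Replaces the linear first-match scan over (threshold, rate) pairs with bisect.bisect_left binary search over a sorted key list plus a parallel value list.
import Mathlib
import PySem

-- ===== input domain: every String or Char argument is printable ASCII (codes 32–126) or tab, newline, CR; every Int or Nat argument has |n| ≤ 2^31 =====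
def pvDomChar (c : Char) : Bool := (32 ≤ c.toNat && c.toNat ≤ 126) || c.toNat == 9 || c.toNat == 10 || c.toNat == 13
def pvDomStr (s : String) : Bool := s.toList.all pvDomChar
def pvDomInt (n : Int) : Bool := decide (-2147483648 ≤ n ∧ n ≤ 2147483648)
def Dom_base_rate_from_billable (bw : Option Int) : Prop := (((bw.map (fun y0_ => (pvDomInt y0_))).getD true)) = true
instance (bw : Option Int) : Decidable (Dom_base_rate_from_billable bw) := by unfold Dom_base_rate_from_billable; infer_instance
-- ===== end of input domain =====

-- B replaces A's linear first-match scan over (threshold, rate) pairs by a binary search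
-- (bisect_left) over a sorted key list with a parallel value list; objective: idiomatic.


-- ===== PORT A =====
-- the `for t, v in thresholds: if bw <= t: return v` loop, falling through to 60
def brLoop (ts : List (Int × Int)) (bw : Int) : Int :=
  match ts with
  | [] => 60
  | (t, v) :: rest => if bw ≤ t then v else brLoop rest bw

def base_rate_from_billable (bw : Option Int) : Option Int :=
  match bw with
  | none => none
  | some b => some (brLoop [(30,5), (40,8), (50,8), (60,10), (70,13), (80,15), (90,18), (100,21), (110,24), (120,25), (130,27), (140,27), (150,30), (200,60)] b)

-- ===== PORT B =====
def brKeys : List Int := [30,40,50,60,70,80,90,100,110,120,130,140,150,200]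
def brVals : List Int := [5,8,8,10,13,15,18,21,24,25,27,27,30,60]

def base_rate_from_billable_alt (bw : Option Int) : Option Int :=
  match bw with
  | none => none
  | some b =>
    let i := PySem.List.bisectLeft brKeys b
    if i < brKeys.length then some (brVals.getD i 0) else some 60

-- ===== PRECONDITION & SPEC =====
def Spec_base_rate_from_billable (bw : Option Int) (out : Option Int) : Prop := out = base_rate_from_billable_alt bw
instance (bw : Option Int) (out : Option Int) : Decidable (Spec_base_rate_from_billable bw out) := by unfold Spec_base_rate_from_billable; infer_instance

-- ===== CLAIM (what is proved, stated in full; the proofs are below) =====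
def Claim_equal_base_rate_from_billable : Prop := ∀ (bw : Option Int), Dom_base_rate_from_billable bw → Spec_base_rate_from_billable bw (base_rate_from_billable bw)

-- ===== LEMMAS AND PROOFS =====

-- bisect_left's result is pinned by the standard bracketing conditions
theorem bl_eq (xs : List Int) (x : Int)
    (hs : List.Pairwise (fun a b => a ≤ b) xs) (k : Nat) (hk : k ≤ xs.length)
    (hlt : ∀ j (hj : j < xs.length), j < k → xs[j] < x)
    (hge : ∀ j (hj : j < xs.length), k ≤ j → x ≤ xs[j]) :
    PySem.List.bisectLeft xs x = k := by
  obtain ⟨h1, h2, h3⟩ := PySem.List.bisectLeft_spec xs x hs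
  set i := PySem.List.bisectLeft xs x with hi
  rcases lt_trichotomy i k with h|h|h
  · have hil : i < xs.length := lt_of_lt_of_le h hk
    have := hlt i hil h
    have := h3 i hil le_rfl
    omega
  · exact h
  · have hkl : k < xs.length := lt_of_lt_of_le h h1
    have := h2 k hkl h
    have := hge k hkl le_rfl
    omega

theorem brKeys_sorted : List.Pairwise (fun a b => a ≤ b) brKeys := by decide

theorem br_some (x : Int) :
    base_rate_from_billable (some x) = base_rate_from_billable_alt (some x) := by
  simp only [base_rate_from_billable, base_rate_from_billable_alt]
  by_cases c0 : x ≤ 30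
  · rw [bl_eq brKeys x brKeys_sorted 0 (by norm_num [brKeys])
      (by intro j hj hjk; norm_num [brKeys] at hj; interval_cases j <;> simp [brKeys] <;> omega)
      (by intro j hj hjk; norm_num [brKeys] at hj; interval_cases j <;> simp [brKeys] <;> omega)]
    simp [brLoop, brKeys, brVals, c0]
  by_cases c1 : x ≤ 40
  · rw [bl_eq brKeys x brKeys_sorted 1 (by norm_num [brKeys])
      (by intro j hj hjk; norm_num [brKeys] at hj; interval_cases j <;> simp [brKeys] <;> omega)
      (by intro j hj hjk; norm_num [brKeys] at hj; interval_cases j <;> simp [brKeys] <;> omega)]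
    simp [brLoop, brKeys, brVals, c1, c0]
  by_cases c2 : x ≤ 50
  · rw [bl_eq brKeys x brKeys_sorted 2 (by norm_num [brKeys])
      (by intro j hj hjk; norm_num [brKeys] at hj; interval_cases j <;> simp [brKeys] <;> omega)
      (by intro j hj hjk; norm_num [brKeys] at hj; interval_cases j <;> simp [brKeys] <;> omega)]
    simp [brLoop, brKeys, brVals, c2, c0, c1]
  by_cases c3 : x ≤ 60
  · rw [bl_eq brKeys x brKeys_sorted 3 (by norm_num [brKeys])
      (by intro j hj hjk; norm_num [brKeys] at hj; interval_cases j <;> simp [brKeys] <;> omega)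
      (by intro j hj hjk; norm_num [brKeys] at hj; interval_cases j <;> simp [brKeys] <;> omega)]
    simp [brLoop, brKeys, brVals, c3, c0, c1, c2]
  by_cases c4 : x ≤ 70
  · rw [bl_eq brKeys x brKeys_sorted 4 (by norm_num [brKeys])
      (by intro j hj hjk; norm_num [brKeys] at hj; interval_cases j <;> simp [brKeys] <;> omega)
      (by intro j hj hjk; norm_num [brKeys] at hj; interval_cases j <;> simp [brKeys] <;> omega)]
    simp [brLoop, brKeys, brVals, c4, c0, c1, c2, c3]
  by_cases c5 : x ≤ 80
  · rw [bl_eq brKeys x brKeys_sorted 5 (by norm_num [brKeys])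
      (by intro j hj hjk; norm_num [brKeys] at hj; interval_cases j <;> simp [brKeys] <;> omega)
      (by intro j hj hjk; norm_num [brKeys] at hj; interval_cases j <;> simp [brKeys] <;> omega)]
    simp [brLoop, brKeys, brVals, c5, c0, c1, c2, c3, c4]
  by_cases c6 : x ≤ 90
  · rw [bl_eq brKeys x brKeys_sorted 6 (by norm_num [brKeys])
      (by intro j hj hjk; norm_num [brKeys] at hj; interval_cases j <;> simp [brKeys] <;> omega)
      (by intro j hj hjk; norm_num [brKeys] at hj; interval_cases j <;> simp [brKeys] <;> omega)]
    simp [brLoop, brKeys, brVals, c6, c0, c1, c2, c3, c4, c5]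
  by_cases c7 : x ≤ 100
  · rw [bl_eq brKeys x brKeys_sorted 7 (by norm_num [brKeys])
      (by intro j hj hjk; norm_num [brKeys] at hj; interval_cases j <;> simp [brKeys] <;> omega)
      (by intro j hj hjk; norm_num [brKeys] at hj; interval_cases j <;> simp [brKeys] <;> omega)]
    simp [brLoop, brKeys, brVals, c7, c0, c1, c2, c3, c4, c5, c6]
  by_cases c8 : x ≤ 110
  · rw [bl_eq brKeys x brKeys_sorted 8 (by norm_num [brKeys])
      (by intro j hj hjk; norm_num [brKeys] at hj; interval_cases j <;> simp [brKeys] <;> omega)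
      (by intro j hj hjk; norm_num [brKeys] at hj; interval_cases j <;> simp [brKeys] <;> omega)]
    simp [brLoop, brKeys, brVals, c8, c0, c1, c2, c3, c4, c5, c6, c7]
  by_cases c9 : x ≤ 120
  · rw [bl_eq brKeys x brKeys_sorted 9 (by norm_num [brKeys])
      (by intro j hj hjk; norm_num [brKeys] at hj; interval_cases j <;> simp [brKeys] <;> omega)
      (by intro j hj hjk; norm_num [brKeys] at hj; interval_cases j <;> simp [brKeys] <;> omega)]
    simp [brLoop, brKeys, brVals, c9, c0, c1, c2, c3, c4, c5, c6, c7, c8]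
  by_cases c10 : x ≤ 130
  · rw [bl_eq brKeys x brKeys_sorted 10 (by norm_num [brKeys])
      (by intro j hj hjk; norm_num [brKeys] at hj; interval_cases j <;> simp [brKeys] <;> omega)
      (by intro j hj hjk; norm_num [brKeys] at hj; interval_cases j <;> simp [brKeys] <;> omega)]
    simp [brLoop, brKeys, brVals, c10, c0, c1, c2, c3, c4, c5, c6, c7, c8, c9]
  by_cases c11 : x ≤ 140
  · rw [bl_eq brKeys x brKeys_sorted 11 (by norm_num [brKeys])
      (by intro j hj hjk; norm_num [brKeys] at hj; interval_cases j <;> simp [brKeys] <;> omega)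
      (by intro j hj hjk; norm_num [brKeys] at hj; interval_cases j <;> simp [brKeys] <;> omega)]
    simp [brLoop, brKeys, brVals, c11, c0, c1, c2, c3, c4, c5, c6, c7, c8, c9, c10]
  by_cases c12 : x ≤ 150
  · rw [bl_eq brKeys x brKeys_sorted 12 (by norm_num [brKeys])
      (by intro j hj hjk; norm_num [brKeys] at hj; interval_cases j <;> simp [brKeys] <;> omega)
      (by intro j hj hjk; norm_num [brKeys] at hj; interval_cases j <;> simp [brKeys] <;> omega)]
    simp [brLoop, brKeys, brVals, c12, c0, c1, c2, c3, c4, c5, c6, c7, c8, c9, c10, c11]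
  by_cases c13 : x ≤ 200
  · rw [bl_eq brKeys x brKeys_sorted 13 (by norm_num [brKeys])
      (by intro j hj hjk; norm_num [brKeys] at hj; interval_cases j <;> simp [brKeys] <;> omega)
      (by intro j hj hjk; norm_num [brKeys] at hj; interval_cases j <;> simp [brKeys] <;> omega)]
    simp [brLoop, brKeys, brVals, c13, c0, c1, c2, c3, c4, c5, c6, c7, c8, c9, c10, c11, c12]
  rw [bl_eq brKeys x brKeys_sorted 14 (by norm_num [brKeys])
      (by intro j hj hjk; norm_num [brKeys] at hj; interval_cases j <;> simp [brKeys] <;> omega)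
      (by intro j hj hjk; norm_num [brKeys] at hj; omega)]
  simp [brLoop, brKeys, brVals, c0, c1, c2, c3, c4, c5, c6, c7, c8, c9, c10, c11, c12, c13]

-- ===== VERDICT (by name: the statement is the Claim_ definition above) =====
theorem base_rate_from_billable_spec : Claim_equal_base_rate_from_billable := by
  intro bw _
  unfold Spec_base_rate_from_billable
  match bw with
  | none => rfl
  | some x => exact br_some x
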